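-- pv_equiv track=rewrite | github.com/JayAnand1/PacketInspector | app/app.py | get_risk_breakdown
-- ===== SOURCE A (Python) =====
-- def get_risk_breakdown(entries):
--     res = [0,0,0,0]
--     for row in entries:
--         if 'ZERO' == row['risk']:
--             res[0] += 1
--         if 'LOW' == row['risk']:
--             res[1] += 1
--         if 'MEDIUM' == row['risk']:
--             res[2] += 1
--         if 'HIGH' == row['risk']:
--             res[3] += 1
--
--     return res
-- ===== SOURCE B (Python) =====
-- def get_risk_breakdown(entries):
--     risks = [row['risk'] for row in entries]
--     return [risks.count(level) for level in ('ZERO', 'LOW', 'MEDIUM', 'HIGH')]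
-- ===== Notes on version B (the rewrite author's own statement) =====
-- stated objective: idiomatic
-- what changed: Replaces the single loop with four per-row branches by a staged pipeline: first extract the risk column, then answer each of the four fixed levels with its own list.count scan.
import Mathlib
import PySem

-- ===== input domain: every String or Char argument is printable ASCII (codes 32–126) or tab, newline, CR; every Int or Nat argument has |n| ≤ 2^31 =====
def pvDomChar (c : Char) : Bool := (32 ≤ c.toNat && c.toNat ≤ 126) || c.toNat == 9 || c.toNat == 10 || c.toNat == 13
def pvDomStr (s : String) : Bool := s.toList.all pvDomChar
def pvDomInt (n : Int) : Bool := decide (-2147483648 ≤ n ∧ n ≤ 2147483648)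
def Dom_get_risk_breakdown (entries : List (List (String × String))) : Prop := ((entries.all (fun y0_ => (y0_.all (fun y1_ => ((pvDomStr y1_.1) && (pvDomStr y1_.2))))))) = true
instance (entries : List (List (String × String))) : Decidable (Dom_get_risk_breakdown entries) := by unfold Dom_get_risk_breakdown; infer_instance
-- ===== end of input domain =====

-- B replaces A's single four-branch counting loop by a staged pipeline: extract the risk column, then count each of the four fixed levels with list.count (idiomatic; same cost).
-- ===== PORT A =====
def stepA (res : Int × Int × Int × Int) (row : List (String × String)) : Int × Int × Int × Int :=
  let r := (row.lookup "risk").getD ""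
  let res := if "ZERO" = r then (res.1 + 1, res.2) else res
  let res := if "LOW" = r then (res.1, res.2.1 + 1, res.2.2) else res
  let res := if "MEDIUM" = r then (res.1, res.2.1, res.2.2.1 + 1, res.2.2.2) else res
  let res := if "HIGH" = r then (res.1, res.2.1, res.2.2.1, res.2.2.2 + 1) else res
  res

def get_risk_breakdown (entries : List (List (String × String))) : List Int :=
  let res := entries.foldl stepA (0, 0, 0, 0)
  [res.1, res.2.1, res.2.2.1, res.2.2.2]

-- ===== PORT B =====
def get_risk_breakdown_alt (entries : List (List (String × String))) : List Int :=
  let risks := entries.map (fun row => (row.lookup "risk").getD "")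
  ["ZERO", "LOW", "MEDIUM", "HIGH"].map (fun level => (PySem.List.count risks level : Int))

-- ===== PRECONDITION & SPEC =====
-- Pre_ excludes rows without a 'risk' key, on which the Python A raises KeyError.
def Pre_get_risk_breakdown (entries : List (List (String × String))) : Prop :=
  ∀ row ∈ entries, (row.lookup "risk").isSome
instance (entries : List (List (String × String))) : Decidable (Pre_get_risk_breakdown entries) := by unfold Pre_get_risk_breakdown; infer_instance
def pvWitness_get_risk_breakdown : (List (List (String × String))) :=
  [[("risk", "HIGH")], [("risk", "LOW"), ("src", "a")]]
def Spec_get_risk_breakdown (entries : List (List (String × String))) (out : List Int) : Prop := out = get_risk_breakdown_alt entries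
instance (entries : List (List (String × String))) (out : List Int) : Decidable (Spec_get_risk_breakdown entries out) := by unfold Spec_get_risk_breakdown; infer_instance

-- ===== CLAIM (what is proved, stated in full; the proofs are below) =====
def Claim_equal_get_risk_breakdown : Prop := ∀ (entries : List (List (String × String))), Dom_get_risk_breakdown entries → Pre_get_risk_breakdown entries → Spec_get_risk_breakdown entries (get_risk_breakdown entries)

-- ===== LEMMAS AND PROOFS =====

theorem stepA_fst (s : Int × Int × Int × Int) (row : List (String × String)) :
    (stepA s row).1 = if "ZERO" = (row.lookup "risk").getD "" then s.1 + 1 else s.1 := by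
  unfold stepA; dsimp only; split_ifs <;> rfl

theorem stepA_snd (s : Int × Int × Int × Int) (row : List (String × String)) :
    (stepA s row).2.1 = if "LOW" = (row.lookup "risk").getD "" then s.2.1 + 1 else s.2.1 := by
  unfold stepA; dsimp only; split_ifs <;> rfl

theorem stepA_thd (s : Int × Int × Int × Int) (row : List (String × String)) :
    (stepA s row).2.2.1 = if "MEDIUM" = (row.lookup "risk").getD "" then s.2.2.1 + 1 else s.2.2.1 := by
  unfold stepA; dsimp only; split_ifs <;> rfl

theorem stepA_fth (s : Int × Int × Int × Int) (row : List (String × String)) :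
    (stepA s row).2.2.2 = if "HIGH" = (row.lookup "risk").getD "" then s.2.2.2 + 1 else s.2.2.2 := by
  unfold stepA; dsimp only; split_ifs <;> rfl

set_option maxRecDepth 8192 in
theorem breakdown_loop (entries : List (List (String × String))) (s : Int × Int × Int × Int) :
    entries.foldl stepA s =
      (let risks := entries.map (fun row => (row.lookup "risk").getD "")
       (s.1 + (risks.count "ZERO" : Int), s.2.1 + (risks.count "LOW" : Int),
        s.2.2.1 + (risks.count "MEDIUM" : Int), s.2.2.2 + (risks.count "HIGH" : Int))) := by
  induction entries generalizing s with
  | nil => obtain ⟨a, b, c, e⟩ := s; simp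
  | cons row rest ih =>
      simp only [List.foldl_cons, List.map_cons, List.count_cons]
      rw [ih]
      refine Prod.ext ?_ (Prod.ext ?_ (Prod.ext ?_ ?_))
      · dsimp only; rw [stepA_fst]
        by_cases h : "ZERO" = (row.lookup "risk").getD ""
        · rw [if_pos h]
          simp only [beq_iff_eq.mpr h.symm, if_true]
          push_cast; ring
        · rw [if_neg h]
          rw [beq_eq_false_iff_ne.mpr (fun e => h e.symm)]; simp
      · dsimp only; rw [stepA_snd]
        by_cases h : "LOW" = (row.lookup "risk").getD ""
        · rw [if_pos h]
          simp only [beq_iff_eq.mpr h.symm, if_true]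
          push_cast; ring
        · rw [if_neg h]
          rw [beq_eq_false_iff_ne.mpr (fun e => h e.symm)]; simp
      · dsimp only; rw [stepA_thd]
        by_cases h : "MEDIUM" = (row.lookup "risk").getD ""
        · rw [if_pos h]
          simp only [beq_iff_eq.mpr h.symm, if_true]
          push_cast; ring
        · rw [if_neg h]
          rw [beq_eq_false_iff_ne.mpr (fun e => h e.symm)]; simp
      · dsimp only; rw [stepA_fth]
        by_cases h : "HIGH" = (row.lookup "risk").getD ""
        · rw [if_pos h]
          simp only [beq_iff_eq.mpr h.symm, if_true]
          push_cast; ring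
        · rw [if_neg h]
          rw [beq_eq_false_iff_ne.mpr (fun e => h e.symm)]; simp

-- ===== VERDICT (by name: the statement is the Claim_ definition above) =====
theorem get_risk_breakdown_spec : Claim_equal_get_risk_breakdown := by
  intro entries _ _
  unfold Spec_get_risk_breakdown get_risk_breakdown get_risk_breakdown_alt
  rw [breakdown_loop]
  simp [PySem.List.count_eq]
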